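-- pv_equiv track=rewrite | github.com/swativ5/notes | computer vision/bayer.py | nearest_neighbor_interpolation
-- ===== SOURCE A (Python) =====
-- def get_rgb_mat(mat, pattern='GRGB'):
--     row_pattern11 = pattern[0] # G
--     row_pattern12 = pattern[1] # R
--     row_pattern21 = pattern[2] # G
--     row_pattern22 = pattern[3] # B
--     R = [[0 for _ in range(len(mat[0]))] for _ in range(len(mat))]
--     G = [[0 for _ in range(len(mat[0]))] for _ in range(len(mat))]
--     B = [[0 for _ in range(len(mat[0]))] for _ in range(len(mat))]
--     col_map = {'R': R, 'G': G, 'B': B}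
--
--     for i in range(len(mat)):
--           for j in range(len(mat[0])):
--               if i % 2 == 0:
--                      if j % 2 == 0:
--                             col_map[row_pattern11][i][j] = mat[i][j]
--                      else:
--                             col_map[row_pattern12][i][j] = mat[i][j]
--               else:
--                      if j % 2 == 0:
--                             col_map[row_pattern22][i][j] = mat[i][j]
--                      else:
--                             col_map[row_pattern21][i][j] = mat[i][j]
--     return [R, G, B]
--
-- def nearest_neighbor_interpolation(mat, pattern='GRGB'):
--     R, G, B = get_rgb_mat(mat, pattern)
--     height = len(mat)
--     width = len(mat[0])
--     RBG_mat = [[[0, 0, 0] for _ in range(width)] for _ in range(height)]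
--
--     for i in range(height):
--         for j in range(width):
--               if (i % 2 == 0) and (j % 2 == 0):
--                      RBG_mat[i][j][0] = R[i][j]
--                      RBG_mat[i][j][1] = G[i][j-1] if j-1 >= 0 else G[i][j+1]
--                      RBG_mat[i][j][2] = B[i-1][j-1] if i-1 >= 0 and j-1 >= 0 else (B[i+1][j+1] if i+1 < height and j+1 < width else 0)
--               elif (i % 2 == 0) and (j % 2 == 1):
--                      RBG_mat[i][j][0] = R[i][j]
--                      RBG_mat[i][j][1] = G[i][j]
--                      RBG_mat[i][j][2] = B[i-1][j] if i-1 >= 0 else B[i+1][j]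
--               elif (i % 2 == 1) and (j % 2 == 0):
--                      RBG_mat[i][j][0] = R[i][j]
--                      RBG_mat[i][j][1] = G[i][j]
--                      RBG_mat[i][j][2] = B[i][j]
--               else:
--                      RBG_mat[i][j][0] = R[i-1][j-1] if i-1 >= 0 and j-1 >= 0 else (R[i+1][j+1] if i+1 < height and j+1 < width else 0)
--                      RBG_mat[i][j][1] = G[i][j-1] if j-1 >= 0 else G[i][j+1]
--                      RBG_mat[i][j][2] = B[i][j]
--     return RBG_mat
-- ===== SOURCE B (Python) =====
-- def nearest_neighbor_interpolation(mat, pattern='GRGB'):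
--     # Channel-major decomposition: instead of scattering into R/G/B matrices and
--     # then branching on the pixel's parity class, compute for each channel a
--     # "source coordinate" rule (R: identity except the odd-odd diagonal; G:
--     # left/right neighbor when the parities agree, identity otherwise; B:
--     # identity on odd rows, vertical neighbor on even rows at odd columns,
--     # diagonal at even-even), build the three full channel planes, and zip them.
--     h, w = len(mat), len(mat[0])
--
--     def bayer(r, c):
--         if r % 2 == 0:
--             return pattern[0] if c % 2 == 0 else pattern[1]
--         return pattern[3] if c % 2 == 0 else pattern[2]
--
--     def grab(rc, ch):
--         if rc is None:
--             return 0
--         r, c = rc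
--         return mat[r][c] if bayer(r, c) == ch else 0
--
--     def diag(i, j):
--         if i >= 1 and j >= 1:
--             return (i - 1, j - 1)
--         if i + 1 < h and j + 1 < w:
--             return (i + 1, j + 1)
--         return None
--
--     def r_src(i, j):
--         return diag(i, j) if (i % 2 == 1 and j % 2 == 1) else (i, j)
--
--     def g_src(i, j):
--         if i % 2 == j % 2:
--             return (i, j - 1) if j >= 1 else (i, j + 1)
--         return (i, j)
--
--     def b_src(i, j):
--         if i % 2 == 1:
--             return (i, j)
--         if j % 2 == 1:
--             return (i - 1, j) if i >= 1 else (i + 1, j)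
--         return diag(i, j)
--
--     def plane(src, ch):
--         return [[grab(src(i, j), ch) for j in range(w)] for i in range(h)]
--
--     Rp = plane(r_src, 'R')
--     Gp = plane(g_src, 'G')
--     Bp = plane(b_src, 'B')
--     return [[[Rp[i][j], Gp[i][j], Bp[i][j]] for j in range(w)] for i in range(h)]
-- ===== Notes on version B (the rewrite author's own statement) =====
-- stated objective: alternative
-- what changed: B replaces A's two-stage pixel-major algorithm (scatter into three zero-filled R/G/B matrices, then a four-way parity branch per pixel mutating an output array) by a channel-major one: each channel gets its own closed source-coordinate rule (R: identity except the odd-odd diagonal; G: horizontal neighbor when row/column parities agree; B: identity on odd rows, vertical or diagonal on even rows), three full channel planes are built from those rules, and the RGB image is their zip.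
import Mathlib
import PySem

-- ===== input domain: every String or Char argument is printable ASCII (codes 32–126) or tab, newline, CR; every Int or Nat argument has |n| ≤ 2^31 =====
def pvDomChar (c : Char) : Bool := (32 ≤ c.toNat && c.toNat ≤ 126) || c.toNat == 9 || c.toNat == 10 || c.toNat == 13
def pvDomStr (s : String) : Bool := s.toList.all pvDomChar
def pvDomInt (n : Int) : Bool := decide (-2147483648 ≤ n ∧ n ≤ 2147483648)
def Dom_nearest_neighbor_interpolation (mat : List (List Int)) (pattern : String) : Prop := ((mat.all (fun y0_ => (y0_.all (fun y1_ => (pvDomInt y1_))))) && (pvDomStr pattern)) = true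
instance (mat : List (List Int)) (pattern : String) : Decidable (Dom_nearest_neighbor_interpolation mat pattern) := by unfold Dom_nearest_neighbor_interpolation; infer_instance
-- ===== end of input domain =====

-- B replaces A's scatter-then-branch pixel pass by a channel-major build: one
-- source-coordinate rule per channel, three gathered planes, then a zip.
-- Objective: alternative decomposition (no speed claim).

-- ===== PORT A =====
-- Shared index primitives (indices are Python-in-range wherever Python does not raise;
-- Pre_ excludes the raising inputs, so the defaults below are never observed inside Pre_).
def pvSetI {α : Type} (xs : List α) (i : Int) (v : α) : List α := xs.set i.toNat v
def pvGet2 (M : List (List Int)) (i j : Int) : Int :=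
  PySem.List.pyGetD (PySem.List.pyGetD M i []) j 0
def pvSet2 (M : List (List Int)) (i j : Int) (v : Int) : List (List Int) :=
  pvSetI M i (pvSetI (PySem.List.pyGetD M i []) j v)
def pvSet3 (M : List (List (List Int))) (i j k : Int) (v : Int) : List (List (List Int)) :=
  pvSetI M i (pvSetI (PySem.List.pyGetD M i []) j
    (pvSetI (PySem.List.pyGetD (PySem.List.pyGetD M i []) j []) k v))
-- pattern[k]; Pre_ gives 4 ≤ len(pattern), so the default is never observed inside Pre_
def pvPat (pattern : String) (k : Int) : Char := (PySem.Str.pyGet? pattern k).getD ' '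

-- col_map[c][i][j] = v : pick which of R/G/B to update by the key character.
-- (c outside 'RGB' is Python's KeyError, excluded by Pre_; the port leaves the state unchanged there.)
def pvColWrite (c : Char) (R G B : List (List Int)) (i j : Int) (v : Int) :
    List (List Int) × List (List Int) × List (List Int) :=
  if c = 'R' then (pvSet2 R i j v, G, B)
  else if c = 'G' then (R, pvSet2 G i j v, B)
  else if c = 'B' then (R, G, pvSet2 B i j v)
  else (R, G, B)

def get_rgb_mat (mat : List (List Int)) (pattern : String) :
    List (List Int) × List (List Int) × List (List Int) :=
  let p11 := pvPat pattern 0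
  let p12 := pvPat pattern 1
  let p21 := pvPat pattern 2
  let p22 := pvPat pattern 3
  let h : Int := (mat.length : Int)
  let w : Int := ((PySem.List.pyGetD mat 0 []).length : Int)
  let Z : List (List Int) :=
    (PySem.List.pyRange 0 h 1).map (fun _ => (PySem.List.pyRange 0 w 1).map (fun _ => (0 : Int)))
  (PySem.List.pyRange 0 h 1).foldl (fun s i =>
    (PySem.List.pyRange 0 w 1).foldl (fun s j =>
      let v := pvGet2 mat i j
      if PySem.Int.mod i 2 = 0 then
        if PySem.Int.mod j 2 = 0 then pvColWrite p11 s.1 s.2.1 s.2.2 i j v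
        else pvColWrite p12 s.1 s.2.1 s.2.2 i j v
      else
        if PySem.Int.mod j 2 = 0 then pvColWrite p22 s.1 s.2.1 s.2.2 i j v
        else pvColWrite p21 s.1 s.2.1 s.2.2 i j v) s) (Z, Z, Z)

def nearest_neighbor_interpolation (mat : List (List Int)) (pattern : String) :
    List (List (List Int)) :=
  let RGB := get_rgb_mat mat pattern
  let R := RGB.1
  let G := RGB.2.1
  let B := RGB.2.2
  let h : Int := (mat.length : Int)
  let w : Int := ((PySem.List.pyGetD mat 0 []).length : Int)
  let init : List (List (List Int)) :=
    (PySem.List.pyRange 0 h 1).map (fun _ =>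
      (PySem.List.pyRange 0 w 1).map (fun _ => ([0, 0, 0] : List Int)))
  (PySem.List.pyRange 0 h 1).foldl (fun M i =>
    (PySem.List.pyRange 0 w 1).foldl (fun M j =>
      if PySem.Int.mod i 2 = 0 ∧ PySem.Int.mod j 2 = 0 then
        let M := pvSet3 M i j 0 (pvGet2 R i j)
        let M := pvSet3 M i j 1 (if j - 1 ≥ 0 then pvGet2 G i (j - 1) else pvGet2 G i (j + 1))
        pvSet3 M i j 2 (if i - 1 ≥ 0 ∧ j - 1 ≥ 0 then pvGet2 B (i - 1) (j - 1)
          else if i + 1 < h ∧ j + 1 < w then pvGet2 B (i + 1) (j + 1) else 0)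
      else if PySem.Int.mod i 2 = 0 ∧ PySem.Int.mod j 2 = 1 then
        let M := pvSet3 M i j 0 (pvGet2 R i j)
        let M := pvSet3 M i j 1 (pvGet2 G i j)
        pvSet3 M i j 2 (if i - 1 ≥ 0 then pvGet2 B (i - 1) j else pvGet2 B (i + 1) j)
      else if PySem.Int.mod i 2 = 1 ∧ PySem.Int.mod j 2 = 0 then
        let M := pvSet3 M i j 0 (pvGet2 R i j)
        let M := pvSet3 M i j 1 (pvGet2 G i j)
        pvSet3 M i j 2 (pvGet2 B i j)
      else
        let M := pvSet3 M i j 0 (if i - 1 ≥ 0 ∧ j - 1 ≥ 0 then pvGet2 R (i - 1) (j - 1)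
          else if i + 1 < h ∧ j + 1 < w then pvGet2 R (i + 1) (j + 1) else 0)
        let M := pvSet3 M i j 1 (if j - 1 ≥ 0 then pvGet2 G i (j - 1) else pvGet2 G i (j + 1))
        pvSet3 M i j 2 (pvGet2 B i j)) M) init

-- ===== PORT B =====
-- Bayer color of cell (r, c), from pattern and the parities of r and c (Source B's `bayer`).
def pvBayer (pattern : String) (r c : Int) : Char :=
  if PySem.Int.mod r 2 = 0 then
    (if PySem.Int.mod c 2 = 0 then pvPat pattern 0 else pvPat pattern 1)
  else
    (if PySem.Int.mod c 2 = 0 then pvPat pattern 3 else pvPat pattern 2)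

-- Source B's `grab`: the sample at an optional source coordinate for a requested channel.
def pvGrab (mat : List (List Int)) (pattern : String) (rc : Option (Int × Int)) (ch : Char) : Int :=
  match rc with
  | none => 0
  | some (r, c) => if pvBayer pattern r c = ch then pvGet2 mat r c else 0

-- Source B's `diag`
def pvDiag (h w i j : Int) : Option (Int × Int) :=
  if 1 ≤ i ∧ 1 ≤ j then some (i - 1, j - 1)
  else if i + 1 < h ∧ j + 1 < w then some (i + 1, j + 1)
  else none

-- Source B's per-channel source rules
def pvRsrc (h w i j : Int) : Option (Int × Int) :=
  if PySem.Int.mod i 2 = 1 ∧ PySem.Int.mod j 2 = 1 then pvDiag h w i j else some (i, j)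
def pvGsrc (i j : Int) : Option (Int × Int) :=
  if PySem.Int.mod i 2 = PySem.Int.mod j 2 then
    (if 1 ≤ j then some (i, j - 1) else some (i, j + 1))
  else some (i, j)
def pvBsrc (h w i j : Int) : Option (Int × Int) :=
  if PySem.Int.mod i 2 = 1 then some (i, j)
  else if PySem.Int.mod j 2 = 1 then (if 1 ≤ i then some (i - 1, j) else some (i + 1, j))
  else pvDiag h w i j

-- Source B's `plane`
def pvPlane (mat : List (List Int)) (pattern : String) (h w : Int)
    (src : Int → Int → Option (Int × Int)) (ch : Char) : List (List Int) :=
  (PySem.List.pyRange 0 h 1).map (fun i =>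
    (PySem.List.pyRange 0 w 1).map (fun j => pvGrab mat pattern (src i j) ch))

def nearest_neighbor_interpolation_alt (mat : List (List Int)) (pattern : String) :
    List (List (List Int)) :=
  let h : Int := (mat.length : Int)
  let w : Int := ((PySem.List.pyGetD mat 0 []).length : Int)
  let Rp := pvPlane mat pattern h w (pvRsrc h w) 'R'
  let Gp := pvPlane mat pattern h w (fun i j => pvGsrc i j) 'G'
  let Bp := pvPlane mat pattern h w (pvBsrc h w) 'B'
  (PySem.List.pyRange 0 h 1).map (fun i =>
    (PySem.List.pyRange 0 w 1).map (fun j =>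
      ([pvGet2 Rp i j, pvGet2 Gp i j, pvGet2 Bp i j] : List Int)))

-- ===== PRECONDITION & SPEC =====
-- Pre_ is exactly the set of inputs on which the Python A returns: it excludes only inputs
-- where A raises (empty mat, a row shorter than row 0, len(pattern) < 4, and — unless
-- row 0 is empty, where the pixel loops are empty — images with fewer than 2 rows or
-- 2 columns (neighbor IndexError) or a pattern character outside 'RGB' (KeyError)).
def Pre_nearest_neighbor_interpolation (mat : List (List Int)) (pattern : String) : Prop :=
  1 ≤ mat.length ∧ 4 ≤ pattern.toList.length ∧
  (∀ row ∈ mat, (PySem.List.pyGetD mat 0 []).length ≤ row.length) ∧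
  ((PySem.List.pyGetD mat 0 []).length = 0 ∨
    (2 ≤ mat.length ∧ 2 ≤ (PySem.List.pyGetD mat 0 []).length ∧
      ∀ c ∈ pattern.toList.take 4, c = 'R' ∨ c = 'G' ∨ c = 'B'))
instance (mat : List (List Int)) (pattern : String) : Decidable (Pre_nearest_neighbor_interpolation mat pattern) := by
  unfold Pre_nearest_neighbor_interpolation; infer_instance

def pvWitness_nearest_neighbor_interpolation : List (List Int) × String :=
  ([[]], "GRGB")

def Spec_nearest_neighbor_interpolation (mat : List (List Int)) (pattern : String) (out : List (List (List Int))) : Prop := out = nearest_neighbor_interpolation_alt mat pattern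
instance (mat : List (List Int)) (pattern : String) (out : List (List (List Int))) : Decidable (Spec_nearest_neighbor_interpolation mat pattern out) := by unfold Spec_nearest_neighbor_interpolation; infer_instance

-- ===== CLAIM (what is proved, stated in full; the proofs are below) =====
def Claim_equal_nearest_neighbor_interpolation : Prop := ∀ (mat : List (List Int)) (pattern : String), Dom_nearest_neighbor_interpolation mat pattern → Pre_nearest_neighbor_interpolation mat pattern → Spec_nearest_neighbor_interpolation mat pattern (nearest_neighbor_interpolation mat pattern)

-- ===== LEMMAS AND PROOFS =====

-- reading a list all of whose elements are the default returns the default, at every index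
lemma pv_pyGetD_const {α : Type} (xs : List α) (i : Int) (d : α) (hall : ∀ x ∈ xs, x = d) :
    PySem.List.pyGetD xs i d = d := by
  rcases h : PySem.List.pyGet? xs i with _ | x
  · simp [PySem.List.pyGetD, h]
  · have := PySem.List.mem_of_pyGet?_eq_some (x := x) (xs := xs) (i := i) h
    simp [PySem.List.pyGetD, h, hall x this]

-- the inner column loop of a scatter pass, generically
lemma pv_inner_scatter {σ α : Type} (step : σ → Int → Int → σ) (read : σ → Int → Int → α)
    (f : Int → Int → α) (z : α) (P : σ → Prop) (w i : Int) (hi : 0 ≤ i)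
    (hP : ∀ s j, 0 ≤ j → j < w → P s → P (step s i j))
    (hstep : ∀ s j, 0 ≤ j → j < w → P s → read s i j = z →
      ∀ i' j', 0 ≤ i' → 0 ≤ j' →
        read (step s i j) i' j' = if i' = i ∧ j' = j then f i j else read s i' j') :
    ∀ b s, 0 ≤ b → P s → (∀ j', b ≤ j' → j' < w → read s i j' = z) →
      P ((PySem.List.pyRange b w 1).foldl (fun s j => step s i j) s) ∧
      ∀ i' j', 0 ≤ i' → 0 ≤ j' →
        read ((PySem.List.pyRange b w 1).foldl (fun s j => step s i j) s) i' j' =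
          if i' = i ∧ b ≤ j' ∧ j' < w then f i j' else read s i' j' := by
  suffices H : ∀ n b s, (w - b).toNat = n → 0 ≤ b → P s →
      (∀ j', b ≤ j' → j' < w → read s i j' = z) →
      P ((PySem.List.pyRange b w 1).foldl (fun s j => step s i j) s) ∧
      ∀ i' j', 0 ≤ i' → 0 ≤ j' →
        read ((PySem.List.pyRange b w 1).foldl (fun s j => step s i j) s) i' j' =
          if i' = i ∧ b ≤ j' ∧ j' < w then f i j' else read s i' j' by
    intro b s hb hPs hz; exact H _ b s rfl hb hPs hz
  intro n
  induction n with
  | zero =>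
    intro b s hfuel hb hPs hz
    rw [PySem.List.pyRange_one_eq_nil (by omega)]
    simp only [List.foldl_nil]
    refine ⟨hPs, ?_⟩
    intro i' j' _ _
    rw [if_neg (by omega)]
  | succ n ih =>
    intro b s hfuel hb hPs hz
    have hbw : b < w := by omega
    rw [PySem.List.pyRange_one_cons hbw]
    simp only [List.foldl_cons]
    have hPs1 : P (step s i b) := hP s b hb hbw hPs
    have hzb : read s i b = z := hz b le_rfl hbw
    have hrw := hstep s b hb hbw hPs hzb
    have hz1 : ∀ j', b + 1 ≤ j' → j' < w → read (step s i b) i j' = z := by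
      intro j' h1 h2
      rw [hrw i j' hi (by omega), if_neg (by omega)]
      exact hz j' (by omega) h2
    obtain ⟨hPf, hrf⟩ := ih (b + 1) (step s i b) (by omega) (by omega) hPs1 hz1
    refine ⟨hPf, ?_⟩
    intro i' j' hi' hj'
    rw [hrf i' j' hi' hj', hrw i' j' hi' hj']
    split_ifs <;> first | rfl | omega | simp_all

-- the full row-by-row scatter pass, generically
lemma pv_outer_scatter {σ α : Type} (step : σ → Int → Int → σ) (read : σ → Int → Int → α)
    (f : Int → Int → α) (z : α) (P : σ → Prop) (h w : Int)
    (hP : ∀ s i j, 0 ≤ i → i < h → 0 ≤ j → j < w → P s → P (step s i j))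
    (hstep : ∀ s i j, 0 ≤ i → i < h → 0 ≤ j → j < w → P s → read s i j = z →
      ∀ i' j', 0 ≤ i' → 0 ≤ j' →
        read (step s i j) i' j' = if i' = i ∧ j' = j then f i j else read s i' j') :
    ∀ a s, 0 ≤ a → P s → (∀ i' j', a ≤ i' → 0 ≤ j' → read s i' j' = z) →
      P ((PySem.List.pyRange a h 1).foldl
          (fun s i => (PySem.List.pyRange 0 w 1).foldl (fun s j => step s i j) s) s) ∧
      ∀ i' j', 0 ≤ i' → 0 ≤ j' →
        read ((PySem.List.pyRange a h 1).foldl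
            (fun s i => (PySem.List.pyRange 0 w 1).foldl (fun s j => step s i j) s) s) i' j' =
          if a ≤ i' ∧ i' < h ∧ 0 ≤ j' ∧ j' < w then f i' j' else read s i' j' := by
  suffices H : ∀ n a s, (h - a).toNat = n → 0 ≤ a → P s →
      (∀ i' j', a ≤ i' → 0 ≤ j' → read s i' j' = z) →
      P ((PySem.List.pyRange a h 1).foldl
          (fun s i => (PySem.List.pyRange 0 w 1).foldl (fun s j => step s i j) s) s) ∧
      ∀ i' j', 0 ≤ i' → 0 ≤ j' →
        read ((PySem.List.pyRange a h 1).foldl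
            (fun s i => (PySem.List.pyRange 0 w 1).foldl (fun s j => step s i j) s) s) i' j' =
          if a ≤ i' ∧ i' < h ∧ 0 ≤ j' ∧ j' < w then f i' j' else read s i' j' by
    intro a s ha hPs hz; exact H _ a s rfl ha hPs hz
  intro n
  induction n with
  | zero =>
    intro a s hfuel ha hPs hz
    rw [PySem.List.pyRange_one_eq_nil (a := a) (b := h) (by omega)]
    simp only [List.foldl_nil]
    refine ⟨hPs, ?_⟩
    intro i' j' _ _
    rw [if_neg (by omega)]
  | succ n ih =>
    intro a s hfuel ha hPs hz
    have hah : a < h := by omega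
    rw [PySem.List.pyRange_one_cons hah]
    simp only [List.foldl_cons]
    obtain ⟨hP1, hr1⟩ := pv_inner_scatter step read f z P w a ha
      (fun s j hj hjw hPs => hP s a j ha hah hj hjw hPs)
      (fun s j hj hjw hPs hz0 => hstep s a j ha hah hj hjw hPs hz0)
      0 s le_rfl hPs (fun j' h1 h2 => hz a j' le_rfl h1)
    obtain ⟨hPf, hrf⟩ := ih (a + 1)
      ((PySem.List.pyRange 0 w 1).foldl (fun s j => step s a j) s)
      (by omega) (by omega) hP1
      (by
        intro i' j' h1 h2
        rw [hr1 i' j' (by omega) h2, if_neg (by omega)]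
        exact hz i' j' (by omega) h2)
    refine ⟨hPf, ?_⟩
    intro i' j' hi' hj'
    rw [hrf i' j' hi' hj', hr1 i' j' hi' hj']
    split_ifs <;> first | rfl | omega | simp_all

-- dimensions of a matrix: the scatter invariant
def pvDims {α : Type} (M : List (List α)) (h w : Int) : Prop :=
  M.length = h.toNat ∧ ∀ row ∈ M, row.length = w.toNat

lemma pv_dims_set2 {M : List (List Int)} {h w i j : Int} (hd : pvDims M h w)
    (hi : 0 ≤ i) (hih : i < h) (v : Int) : pvDims (pvSet2 M i j v) h w := by
  obtain ⟨hlen, hrow⟩ := hd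
  have hiN : i.toNat < M.length := by omega
  constructor
  · simpa [pvSet2, pvSetI] using hlen
  · intro row hmem
    rcases List.mem_or_eq_of_mem_set hmem with h1 | h1
    · exact hrow _ h1
    · subst h1
      have e : PySem.List.pyGetD M i [] = M[i.toNat] :=
        PySem.List.pyGetD_eq_getElem _ _ hi (by omega)
      simp [pvSetI, e]
      exact hrow _ (List.getElem_mem hiN)

lemma pvGet2_pvSet2 {M : List (List Int)} {h w : Int} (hd : pvDims M h w)
    {i j : Int} (hi : 0 ≤ i) (hih : i < h) (hj : 0 ≤ j) (hjw : j < w) (v : Int)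
    {i' j' : Int} (hi' : 0 ≤ i') (hj' : 0 ≤ j') :
    pvGet2 (pvSet2 M i j v) i' j' = if i' = i ∧ j' = j then v else pvGet2 M i' j' := by
  obtain ⟨hlen, hrow⟩ := hd
  have hiN : i.toNat < M.length := by omega
  have hrowlen : M[i.toNat].length = w.toNat := hrow _ (List.getElem_mem hiN)
  have hjN : j.toNat < M[i.toNat].length := by omega
  unfold pvGet2 pvSet2 pvSetI
  simp only [PySem.List.pyGetD_of_nonneg, hi, hi', hj']
  rw [List.getD_eq_getElem _ _ hiN]
  by_cases hii : i' = i
  · subst hii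
    have e1 : (M.set i'.toNat (M[i'.toNat].set j.toNat v)).getD i'.toNat [] =
        M[i'.toNat].set j.toNat v := by
      simp [List.getD, hiN]
    rw [e1]
    by_cases hjj : j' = j
    · subst hjj
      simp [List.getD, hjN]
    · have hne : j.toNat ≠ j'.toNat := by omega
      simp [List.getD, List.getElem?_set_ne, hne, List.getElem?_eq_getElem hiN, hjj]
  · have hne : i.toNat ≠ i'.toNat := by omega
    simp [List.getD, List.getElem?_set_ne, hne, hii]

lemma pv_dims_set3 {M : List (List (List Int))} {h w i j : Int} (hd : pvDims M h w)
    (hi : 0 ≤ i) (hih : i < h) (k v : Int) : pvDims (pvSet3 M i j k v) h w := by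
  obtain ⟨hlen, hrow⟩ := hd
  have hiN : i.toNat < M.length := by omega
  constructor
  · simpa [pvSet3, pvSetI] using hlen
  · intro row hmem
    rcases List.mem_or_eq_of_mem_set hmem with h1 | h1
    · exact hrow _ h1
    · subst h1
      have e : PySem.List.pyGetD M i [] = M[i.toNat] :=
        PySem.List.pyGetD_eq_getElem _ _ hi (by omega)
      simp [pvSetI, e]
      exact hrow _ (List.getElem_mem hiN)

-- reading a pixel cell of the output matrix (proof-side only)
def pvRead3 (M : List (List (List Int))) (i j : Int) : List Int :=
  PySem.List.pyGetD (PySem.List.pyGetD M i []) j [0, 0, 0]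

lemma pvRead3_pvSet3 {M : List (List (List Int))} {h w : Int} (hd : pvDims M h w)
    {i j : Int} (hi : 0 ≤ i) (hih : i < h) (hj : 0 ≤ j) (hjw : j < w) (k v : Int)
    {i' j' : Int} (hi' : 0 ≤ i') (hj' : 0 ≤ j') :
    pvRead3 (pvSet3 M i j k v) i' j' =
      if i' = i ∧ j' = j then (pvRead3 M i j).set k.toNat v else pvRead3 M i' j' := by
  obtain ⟨hlen, hrow⟩ := hd
  have hiN : i.toNat < M.length := by omega
  have hrowlen : M[i.toNat].length = w.toNat := hrow _ (List.getElem_mem hiN)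
  have hjN : j.toNat < M[i.toNat].length := by omega
  unfold pvRead3 pvSet3 pvSetI
  simp only [PySem.List.pyGetD_of_nonneg, hi, hj, hi', hj']
  rw [List.getD_eq_getElem _ _ hiN, List.getD_eq_getElem _ _ hjN]
  by_cases hii : i' = i
  · subst hii
    have e1 : (M.set i'.toNat (M[i'.toNat].set j.toNat (M[i'.toNat][j.toNat].set k.toNat v))).getD
        i'.toNat [] = M[i'.toNat].set j.toNat (M[i'.toNat][j.toNat].set k.toNat v) := by
      simp [List.getD, hiN]
    rw [e1]
    by_cases hjj : j' = j
    · subst hjj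
      simp [List.getD, hjN]
    · have hne : j.toNat ≠ j'.toNat := by omega
      simp [List.getD, List.getElem?_set_ne, hne, List.getElem?_eq_getElem hiN, hjj]
  · have hne : i.toNat ≠ i'.toNat := by omega
    simp [List.getD, List.getElem?_set_ne, hne, hii]

lemma pv_mod2 (j : Int) : PySem.Int.mod j 2 = 0 ∨ PySem.Int.mod j 2 = 1 := by
  have h1 := PySem.Int.mod_nonneg j (b := 2) (by omega)
  have h2 := PySem.Int.mod_lt j (b := 2) (by omega)
  omega

-- the zero matrix both passes of A start from (proof-side name for the port's local Z / init)
def pvZeros {α : Type} (h w : Int) (z : α) : List (List α) :=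
  (PySem.List.pyRange 0 h 1).map (fun _ => (PySem.List.pyRange 0 w 1).map (fun _ => z))

lemma pv_dims_zeros {α : Type} (h w : Int) (z : α) : pvDims (pvZeros h w z) h w := by
  constructor
  · simp [pvZeros, PySem.List.length_pyRange_one]
  · intro row hmem
    rcases List.mem_map.1 hmem with ⟨_, _, rfl⟩
    simp [PySem.List.length_pyRange_one]

lemma pv_read_zeros {α : Type} (h w : Int) (z : α) (i j : Int) :
    PySem.List.pyGetD (PySem.List.pyGetD (pvZeros h w z) i []) j z = z := by
  rcases hx : PySem.List.pyGet? (pvZeros h w z) i with _ | x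
  · have h0 : PySem.List.pyGetD (pvZeros h w z) i [] = [] := by
      simp [PySem.List.pyGetD, hx]
    rw [h0]
    exact pv_pyGetD_const [] j z (by simp)
  · have hmem := PySem.List.mem_of_pyGet?_eq_some (x := x) (xs := pvZeros h w z) (i := i) hx
    rcases List.mem_map.1 hmem with ⟨_, _, rfl⟩
    have hrw : PySem.List.pyGetD (pvZeros h w z) i [] = (PySem.List.pyRange 0 w 1).map (fun _ => z) := by
      simp [PySem.List.pyGetD, hx]
    rw [hrw]
    apply pv_pyGetD_const
    intro x hx2
    rcases List.mem_map.1 hx2 with ⟨_, _, rfl⟩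
    rfl

-- mat[r][c] if (r, c) is in bounds and its Bayer color is ch, else 0 (proof-side
-- characterization of the channel matrices A scatters).
def pvVal (mat : List (List Int)) (pattern : String) (h w r c : Int) (ch : Char) : Int :=
  if 0 ≤ r ∧ r < h ∧ 0 ≤ c ∧ c < w ∧ pvBayer pattern r c = ch then pvGet2 mat r c else 0

-- ===== phase 1: get_rgb_mat is a scatter whose per-cell reads are pvVal =====

def pvRead1 (s : List (List Int) × List (List Int) × List (List Int)) (i j : Int) :
    Int × Int × Int :=
  (pvGet2 s.1 i j, pvGet2 s.2.1 i j, pvGet2 s.2.2 i j)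

def pvTriple (c : Char) (v : Int) : Int × Int × Int :=
  (if c = 'R' then v else 0, if c = 'G' then v else 0, if c = 'B' then v else 0)

def pvP1 (h w : Int) (s : List (List Int) × List (List Int) × List (List Int)) : Prop :=
  pvDims s.1 h w ∧ pvDims s.2.1 h w ∧ pvDims s.2.2 h w

-- the loop body of get_rgb_mat, named (definitionally the port's inner lambda)
def pvStep1 (mat : List (List Int)) (pattern : String)
    (s : List (List Int) × List (List Int) × List (List Int)) (i j : Int) :
    List (List Int) × List (List Int) × List (List Int) :=
  if PySem.Int.mod i 2 = 0 then
    if PySem.Int.mod j 2 = 0 then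
      pvColWrite (pvPat pattern 0) s.1 s.2.1 s.2.2 i j (pvGet2 mat i j)
    else pvColWrite (pvPat pattern 1) s.1 s.2.1 s.2.2 i j (pvGet2 mat i j)
  else
    if PySem.Int.mod j 2 = 0 then
      pvColWrite (pvPat pattern 3) s.1 s.2.1 s.2.2 i j (pvGet2 mat i j)
    else pvColWrite (pvPat pattern 2) s.1 s.2.1 s.2.2 i j (pvGet2 mat i j)

lemma pv_colWrite_dims {h w : Int} (c : Char) {R G B : List (List Int)}
    (hR : pvDims R h w) (hG : pvDims G h w) (hB : pvDims B h w)
    {i j : Int} (hi : 0 ≤ i) (hih : i < h) (v : Int) :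
    pvP1 h w (pvColWrite c R G B i j v) := by
  unfold pvColWrite pvP1
  split_ifs <;>
    refine ⟨?_, ?_, ?_⟩ <;>
    first
      | exact pv_dims_set2 hR hi hih v
      | exact pv_dims_set2 hG hi hih v
      | exact pv_dims_set2 hB hi hih v
      | assumption

lemma pv_colWrite_read {h w : Int} (c : Char) {R G B : List (List Int)}
    (hR : pvDims R h w) (hG : pvDims G h w) (hB : pvDims B h w)
    {i j : Int} (hi : 0 ≤ i) (hih : i < h) (hj : 0 ≤ j) (hjw : j < w) (v : Int)
    (hz : pvRead1 (R, G, B) i j = (0, 0, 0))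
    {i' j' : Int} (hi' : 0 ≤ i') (hj' : 0 ≤ j') :
    pvRead1 (pvColWrite c R G B i j v) i' j' =
      if i' = i ∧ j' = j then pvTriple c v else pvRead1 (R, G, B) i' j' := by
  simp only [pvRead1, Prod.mk.injEq] at hz
  obtain ⟨hz1, hz2, hz3⟩ := hz
  unfold pvColWrite
  by_cases hc1 : c = 'R'
  · rw [if_pos hc1]
    simp only [pvRead1]
    rw [pvGet2_pvSet2 hR hi hih hj hjw v hi' hj']
    by_cases he : i' = i ∧ j' = j
    · obtain ⟨rfl, rfl⟩ := he
      simp [pvTriple, hc1, hz2, hz3]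
    · rw [if_neg he, if_neg he]
  · rw [if_neg hc1]
    by_cases hc2 : c = 'G'
    · rw [if_pos hc2]
      simp only [pvRead1]
      rw [pvGet2_pvSet2 hG hi hih hj hjw v hi' hj']
      by_cases he : i' = i ∧ j' = j
      · obtain ⟨rfl, rfl⟩ := he
        simp [pvTriple, hc2, hz1, hz3]
      · rw [if_neg he, if_neg he]
    · rw [if_neg hc2]
      by_cases hc3 : c = 'B'
      · rw [if_pos hc3]
        simp only [pvRead1]
        rw [pvGet2_pvSet2 hB hi hih hj hjw v hi' hj']
        by_cases he : i' = i ∧ j' = j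
        · obtain ⟨rfl, rfl⟩ := he
          simp [pvTriple, hc3, hz1, hz2]
        · rw [if_neg he, if_neg he]
      · rw [if_neg hc3]
        by_cases he : i' = i ∧ j' = j
        · obtain ⟨rfl, rfl⟩ := he
          simp [pvRead1, pvTriple, hc1, hc2, hc3, hz1, hz2, hz3]
        · rw [if_neg he]

lemma pv_step1_read (mat : List (List Int)) (pattern : String) (h w : Int) :
    ∀ s i j, 0 ≤ i → i < h → 0 ≤ j → j < w → pvP1 h w s → pvRead1 s i j = (0, 0, 0) →
      ∀ i' j', 0 ≤ i' → 0 ≤ j' →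
        pvRead1 (pvStep1 mat pattern s i j) i' j' =
          if i' = i ∧ j' = j then pvTriple (pvBayer pattern i j) (pvGet2 mat i j)
          else pvRead1 s i' j' := by
  intro s i j hi hih hj hjw hP hz i' j' hi' hj'
  obtain ⟨s1, s2, s3⟩ := s
  obtain ⟨hR, hG, hB⟩ := hP
  unfold pvStep1 pvBayer
  rcases pv_mod2 i with h1 | h1 <;> rcases pv_mod2 j with h2 | h2 <;>
    simp only [h1, h2] <;> norm_num <;>
    exact pv_colWrite_read _ hR hG hB hi hih hj hjw _ hz hi' hj'

lemma pv_step1_dims (mat : List (List Int)) (pattern : String) (h w : Int) :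
    ∀ s i j, 0 ≤ i → i < h → 0 ≤ j → j < w → pvP1 h w s →
      pvP1 h w (pvStep1 mat pattern s i j) := by
  intro s i j hi hih hj hjw hP
  obtain ⟨s1, s2, s3⟩ := s
  obtain ⟨hR, hG, hB⟩ := hP
  unfold pvStep1
  split_ifs <;> exact pv_colWrite_dims _ hR hG hB hi hih _

-- the characterization of get_rgb_mat: each channel matrix reads as pvVal
lemma pv_rgb_reads (mat : List (List Int)) (pattern : String) (i j : Int)
    (hi : 0 ≤ i) (hj : 0 ≤ j) :
    pvGet2 (get_rgb_mat mat pattern).1 i j =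
        pvVal mat pattern (mat.length : Int) ((PySem.List.pyGetD mat 0 []).length : Int) i j 'R' ∧
    pvGet2 (get_rgb_mat mat pattern).2.1 i j =
        pvVal mat pattern (mat.length : Int) ((PySem.List.pyGetD mat 0 []).length : Int) i j 'G' ∧
    pvGet2 (get_rgb_mat mat pattern).2.2 i j =
        pvVal mat pattern (mat.length : Int) ((PySem.List.pyGetD mat 0 []).length : Int) i j 'B' := by
  set h : Int := (mat.length : Int) with hh
  set w : Int := ((PySem.List.pyGetD mat 0 []).length : Int) with hw
  have hZ : pvDims (pvZeros h w (0 : Int)) h w := pv_dims_zeros h w 0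
  obtain ⟨hPf, hrf⟩ := pv_outer_scatter (pvStep1 mat pattern) pvRead1
    (fun i j => pvTriple (pvBayer pattern i j) (pvGet2 mat i j)) (0, 0, 0) (pvP1 h w) h w
    (pv_step1_dims mat pattern h w) (pv_step1_read mat pattern h w)
    0 (pvZeros h w 0, pvZeros h w 0, pvZeros h w 0) le_rfl ⟨hZ, hZ, hZ⟩
    (by
      intro i' j' _ _
      unfold pvRead1 pvGet2
      rw [pv_read_zeros])
  have hkey : get_rgb_mat mat pattern =
      (PySem.List.pyRange 0 h 1).foldl
        (fun s i => (PySem.List.pyRange 0 w 1).foldl (fun s j => pvStep1 mat pattern s i j) s)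
        (pvZeros h w 0, pvZeros h w 0, pvZeros h w 0) := rfl
  have hr := hrf i j hi hj
  have hz0 : pvRead1 (pvZeros h w 0, pvZeros h w 0, pvZeros h w 0) i j =
      ((0 : Int), (0 : Int), (0 : Int)) := by
    unfold pvRead1 pvGet2
    rw [pv_read_zeros]
  rw [hz0] at hr
  by_cases hin : 0 ≤ i ∧ i < h ∧ 0 ≤ j ∧ j < w
  · rw [if_pos hin] at hr
    simp only [pvRead1, pvTriple, Prod.mk.injEq] at hr
    obtain ⟨e1, e2, e3⟩ := hr
    refine ⟨?_, ?_, ?_⟩ <;> rw [hkey]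
    · rw [e1]
      unfold pvVal
      split_ifs <;> first | rfl | tauto
    · rw [e2]
      unfold pvVal
      split_ifs <;> first | rfl | tauto
    · rw [e3]
      unfold pvVal
      split_ifs <;> first | rfl | tauto
  · rw [if_neg hin] at hr
    simp only [pvRead1, Prod.mk.injEq] at hr
    obtain ⟨e1, e2, e3⟩ := hr
    refine ⟨?_, ?_, ?_⟩ <;> rw [hkey]
    · rw [e1]
      unfold pvVal
      rw [if_neg (by tauto)]
    · rw [e2]
      unfold pvVal
      rw [if_neg (by tauto)]
    · rw [e3]
      unfold pvVal
      rw [if_neg (by tauto)]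

-- ===== phase 2: the pixel loop is a scatter whose per-cell value is pvF2 =====

-- the loop body of the pixel loop, named (definitionally the port's inner lambda)
def pvStep2 (R G B : List (List Int)) (h w : Int) (M : List (List (List Int))) (i j : Int) :
    List (List (List Int)) :=
  if PySem.Int.mod i 2 = 0 ∧ PySem.Int.mod j 2 = 0 then
    pvSet3 (pvSet3 (pvSet3 M i j 0 (pvGet2 R i j))
        i j 1 (if j - 1 ≥ 0 then pvGet2 G i (j - 1) else pvGet2 G i (j + 1)))
      i j 2 (if i - 1 ≥ 0 ∧ j - 1 ≥ 0 then pvGet2 B (i - 1) (j - 1)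
        else if i + 1 < h ∧ j + 1 < w then pvGet2 B (i + 1) (j + 1) else 0)
  else if PySem.Int.mod i 2 = 0 ∧ PySem.Int.mod j 2 = 1 then
    pvSet3 (pvSet3 (pvSet3 M i j 0 (pvGet2 R i j)) i j 1 (pvGet2 G i j))
      i j 2 (if i - 1 ≥ 0 then pvGet2 B (i - 1) j else pvGet2 B (i + 1) j)
  else if PySem.Int.mod i 2 = 1 ∧ PySem.Int.mod j 2 = 0 then
    pvSet3 (pvSet3 (pvSet3 M i j 0 (pvGet2 R i j)) i j 1 (pvGet2 G i j)) i j 2 (pvGet2 B i j)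
  else
    pvSet3 (pvSet3 (pvSet3 M i j 0 (if i - 1 ≥ 0 ∧ j - 1 ≥ 0 then pvGet2 R (i - 1) (j - 1)
          else if i + 1 < h ∧ j + 1 < w then pvGet2 R (i + 1) (j + 1) else 0))
        i j 1 (if j - 1 ≥ 0 then pvGet2 G i (j - 1) else pvGet2 G i (j + 1)))
      i j 2 (pvGet2 B i j)

-- the pixel A's loop leaves at (i, j), with the channel reads still symbolic
def pvF2 (R G B : List (List Int)) (h w i j : Int) : List Int :=
  if PySem.Int.mod i 2 = 0 ∧ PySem.Int.mod j 2 = 0 then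
    [pvGet2 R i j,
     if j - 1 ≥ 0 then pvGet2 G i (j - 1) else pvGet2 G i (j + 1),
     if i - 1 ≥ 0 ∧ j - 1 ≥ 0 then pvGet2 B (i - 1) (j - 1)
     else if i + 1 < h ∧ j + 1 < w then pvGet2 B (i + 1) (j + 1) else 0]
  else if PySem.Int.mod i 2 = 0 ∧ PySem.Int.mod j 2 = 1 then
    [pvGet2 R i j, pvGet2 G i j,
     if i - 1 ≥ 0 then pvGet2 B (i - 1) j else pvGet2 B (i + 1) j]
  else if PySem.Int.mod i 2 = 1 ∧ PySem.Int.mod j 2 = 0 then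
    [pvGet2 R i j, pvGet2 G i j, pvGet2 B i j]
  else
    [if i - 1 ≥ 0 ∧ j - 1 ≥ 0 then pvGet2 R (i - 1) (j - 1)
     else if i + 1 < h ∧ j + 1 < w then pvGet2 R (i + 1) (j + 1) else 0,
     if j - 1 ≥ 0 then pvGet2 G i (j - 1) else pvGet2 G i (j + 1),
     pvGet2 B i j]

lemma pvRead3_triple {M : List (List (List Int))} {h w : Int} (hd : pvDims M h w)
    {i j : Int} (hi : 0 ≤ i) (hih : i < h) (hj : 0 ≤ j) (hjw : j < w)
    (hz : pvRead3 M i j = [0, 0, 0]) (r g b : Int)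
    {i' j' : Int} (hi' : 0 ≤ i') (hj' : 0 ≤ j') :
    pvRead3 (pvSet3 (pvSet3 (pvSet3 M i j 0 r) i j 1 g) i j 2 b) i' j' =
      if i' = i ∧ j' = j then [r, g, b] else pvRead3 M i' j' := by
  have d1 : pvDims (pvSet3 M i j 0 r) h w := pv_dims_set3 hd hi hih 0 r
  have d2 : pvDims (pvSet3 (pvSet3 M i j 0 r) i j 1 g) h w := pv_dims_set3 d1 hi hih 1 g
  rw [pvRead3_pvSet3 d2 hi hih hj hjw 2 b hi' hj']
  by_cases he : i' = i ∧ j' = j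
  · rw [if_pos he, if_pos he,
      pvRead3_pvSet3 d1 hi hih hj hjw 1 g hi hj, if_pos ⟨rfl, rfl⟩,
      pvRead3_pvSet3 hd hi hih hj hjw 0 r hi hj, if_pos ⟨rfl, rfl⟩, hz]
    rfl
  · rw [if_neg he, if_neg he,
      pvRead3_pvSet3 d1 hi hih hj hjw 1 g hi' hj', if_neg he,
      pvRead3_pvSet3 hd hi hih hj hjw 0 r hi' hj', if_neg he]

lemma pv_step2_dims (R G B : List (List Int)) (h w : Int) :
    ∀ M i j, 0 ≤ i → i < h → 0 ≤ j → j < w → pvDims M h w →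
      pvDims (pvStep2 R G B h w M i j) h w := by
  intro M i j hi hih hj hjw hd
  unfold pvStep2
  split_ifs <;>
  · apply pv_dims_set3 _ hi hih
    apply pv_dims_set3 _ hi hih
    apply pv_dims_set3 hd hi hih

lemma pv_step2_read (R G B : List (List Int)) (h w : Int) :
    ∀ M i j, 0 ≤ i → i < h → 0 ≤ j → j < w → pvDims M h w → pvRead3 M i j = [0, 0, 0] →
      ∀ i' j', 0 ≤ i' → 0 ≤ j' →
        pvRead3 (pvStep2 R G B h w M i j) i' j' =
          if i' = i ∧ j' = j then pvF2 R G B h w i j else pvRead3 M i' j' := by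
  intro M i j hi hih hj hjw hd hz i' j' hi' hj'
  unfold pvStep2 pvF2
  rcases pv_mod2 i with h1 | h1 <;> rcases pv_mod2 j with h2 | h2 <;>
    simp only [h1, h2] <;> norm_num <;>
    exact pvRead3_triple hd hi hih hj hjw hz _ _ _ hi' hj'

-- ===== phase 3: B's planes read as pvGrab, and pvF2 equals B's gathered triple =====

lemma pv_plane_read (mat : List (List Int)) (pattern : String) (h w : Int)
    (src : Int → Int → Option (Int × Int)) (ch : Char) (i j : Int)
    (hi : 0 ≤ i) (hih : i < h) (hj : 0 ≤ j) (hjw : j < w) :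
    pvGet2 (pvPlane mat pattern h w src ch) i j = pvGrab mat pattern (src i j) ch := by
  unfold pvPlane pvGet2
  have hlen : ((PySem.List.pyRange 0 h 1).map (fun i =>
      (PySem.List.pyRange 0 w 1).map (fun j => pvGrab mat pattern (src i j) ch))).length
      = h.toNat := by
    simp [PySem.List.length_pyRange_one]
  rw [PySem.List.pyGetD_of_nonneg _ _ hi]
  rw [List.getD_eq_getElem _ _ (by rw [hlen]; omega)]
  rw [List.getElem_map, PySem.List.getElem_pyRange_one _ _ _ (by
    simp [PySem.List.length_pyRange_one]; omega)]
  have hlen2 : ((PySem.List.pyRange 0 w 1).map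
      (fun j => pvGrab mat pattern (src (0 + (i.toNat : Int)) j) ch)).length = w.toNat := by
    simp [PySem.List.length_pyRange_one]
  rw [PySem.List.pyGetD_of_nonneg _ _ hj]
  rw [List.getD_eq_getElem _ _ (by rw [hlen2]; omega)]
  rw [List.getElem_map, PySem.List.getElem_pyRange_one _ _ _ (by
    simp [PySem.List.length_pyRange_one]; omega)]
  rw [show (0 : Int) + (i.toNat : Int) = i by omega, show (0 : Int) + (j.toNat : Int) = j by omega]

-- pvGrab at an in-bounds coordinate is pvVal
lemma pv_grab_val (mat : List (List Int)) (pattern : String) (h w r c : Int) (ch : Char)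
    (hr : 0 ≤ r) (hrh : r < h) (hc : 0 ≤ c) (hcw : c < w) :
    pvGrab mat pattern (some (r, c)) ch = pvVal mat pattern h w r c ch := by
  simp only [pvGrab, pvVal]
  split_ifs <;> first | rfl | tauto

-- A's symbolic pixel equals B's gathered triple, given at least a 2×2 image
lemma pv_f2_grab (mat : List (List Int)) (pattern : String) (h w i j : Int)
    (hh2 : 2 ≤ h) (hw2 : 2 ≤ w) (hi : 0 ≤ i) (hih : i < h) (hj : 0 ≤ j) (hjw : j < w)
    (hR : ∀ a b : Int, 0 ≤ a → 0 ≤ b → pvGet2 (get_rgb_mat mat pattern).1 a b =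
        pvVal mat pattern h w a b 'R')
    (hG : ∀ a b : Int, 0 ≤ a → 0 ≤ b → pvGet2 (get_rgb_mat mat pattern).2.1 a b =
        pvVal mat pattern h w a b 'G')
    (hB : ∀ a b : Int, 0 ≤ a → 0 ≤ b → pvGet2 (get_rgb_mat mat pattern).2.2 a b =
        pvVal mat pattern h w a b 'B') :
    pvF2 (get_rgb_mat mat pattern).1 (get_rgb_mat mat pattern).2.1 (get_rgb_mat mat pattern).2.2
      h w i j =
    [pvGrab mat pattern (pvRsrc h w i j) 'R',
     pvGrab mat pattern (pvGsrc i j) 'G',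
     pvGrab mat pattern (pvBsrc h w i j) 'B'] := by
  have hval : ∀ (ch : Char) (r c : Int), 0 ≤ r → r < h → 0 ≤ c → c < w →
      pvVal mat pattern h w r c ch = pvGrab mat pattern (some (r, c)) ch :=
    fun ch r c h1 h2 h3 h4 => (pv_grab_val mat pattern h w r c ch h1 h2 h3 h4).symm
  unfold pvF2 pvRsrc pvGsrc pvBsrc pvDiag
  rcases pv_mod2 i with h1 | h1 <;> rcases pv_mod2 j with h2 | h2 <;>
    simp only [h1, h2] <;> norm_num
  · -- even-even: R identity, G horizontal, B diagonal
    refine ⟨?_, ?_, ?_⟩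
    · rw [hR i j hi hj, hval _ _ _ hi hih hj hjw]
    · split_ifs with hc
      · rw [hG i (j - 1) hi (by omega), hval _ _ _ hi hih (by omega) (by omega)]
      · rw [hG i (j + 1) hi (by omega), hval _ _ _ hi hih (by omega) (by omega)]
    · split_ifs with hc1 hc2 <;> try omega
      · rw [hB (i - 1) (j - 1) (by omega) (by omega),
          hval _ _ _ (by omega) (by omega) (by omega) (by omega)]
      · rw [hB (i + 1) (j + 1) (by omega) (by omega),
          hval _ _ _ (by omega) (by omega) (by omega) (by omega)]
      · rfl
  · -- even-odd: R identity, G identity, B vertical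
    refine ⟨?_, ?_, ?_⟩
    · rw [hR i j hi hj, hval _ _ _ hi hih hj hjw]
    · rw [hG i j hi hj, hval _ _ _ hi hih hj hjw]
    · split_ifs with hc <;> try omega
      · rw [hB (i - 1) j (by omega) hj, hval _ _ _ (by omega) (by omega) hj hjw]
      · rw [hB (i + 1) j (by omega) hj, hval _ _ _ (by omega) (by omega) hj hjw]
  · -- odd-even: all identity
    exact ⟨by rw [hR i j hi hj, hval _ _ _ hi hih hj hjw],
      by rw [hG i j hi hj, hval _ _ _ hi hih hj hjw],
      by rw [hB i j hi hj, hval _ _ _ hi hih hj hjw]⟩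
  · -- odd-odd: R diagonal, G horizontal, B identity
    refine ⟨?_, ?_, ?_⟩
    · split_ifs with hc1 hc2 <;> try omega
      · rw [hR (i - 1) (j - 1) (by omega) (by omega),
          hval _ _ _ (by omega) (by omega) (by omega) (by omega)]
      · rw [hR (i + 1) (j + 1) (by omega) (by omega),
          hval _ _ _ (by omega) (by omega) (by omega) (by omega)]
      · rfl
    · split_ifs with hc
      · rw [hG i (j - 1) hi (by omega), hval _ _ _ hi hih (by omega) (by omega)]
      · rw [hG i (j + 1) hi (by omega), hval _ _ _ hi hih (by omega) (by omega)]
    · rw [hB i j hi hj, hval _ _ _ hi hih hj hjw]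

-- the two ports agree, given at least a 2×2 image or an empty row 0
lemma pv_ports_eq (mat : List (List Int)) (pattern : String)
    (hsz : (PySem.List.pyGetD mat 0 []).length = 0 ∨
      (2 ≤ mat.length ∧ 2 ≤ (PySem.List.pyGetD mat 0 []).length)) :
    nearest_neighbor_interpolation mat pattern = nearest_neighbor_interpolation_alt mat pattern := by
  set h : Int := (mat.length : Int) with hh
  set w : Int := ((PySem.List.pyGetD mat 0 []).length : Int) with hw
  set R := (get_rgb_mat mat pattern).1 with hRdef
  set G := (get_rgb_mat mat pattern).2.1 with hGdef
  set B := (get_rgb_mat mat pattern).2.2 with hBdef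
  obtain ⟨hPf, hrf⟩ := pv_outer_scatter (pvStep2 R G B h w) pvRead3 (pvF2 R G B h w)
    [0, 0, 0] (fun M => pvDims M h w) h w
    (pv_step2_dims R G B h w) (pv_step2_read R G B h w)
    0 (pvZeros h w ([0, 0, 0] : List Int)) le_rfl (pv_dims_zeros h w _)
    (fun i' j' _ _ => pv_read_zeros h w ([0, 0, 0] : List Int) i' j')
  have hkey : nearest_neighbor_interpolation mat pattern =
      (PySem.List.pyRange 0 h 1).foldl
        (fun M i => (PySem.List.pyRange 0 w 1).foldl (fun M j => pvStep2 R G B h w M i j) M)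
        (pvZeros h w ([0, 0, 0] : List Int)) := rfl
  have halt : nearest_neighbor_interpolation_alt mat pattern =
      (PySem.List.pyRange 0 h 1).map (fun i =>
        (PySem.List.pyRange 0 w 1).map (fun j =>
          ([pvGet2 (pvPlane mat pattern h w (pvRsrc h w) 'R') i j,
            pvGet2 (pvPlane mat pattern h w (fun i j => pvGsrc i j) 'G') i j,
            pvGet2 (pvPlane mat pattern h w (pvBsrc h w) 'B') i j] : List Int))) := rfl
  rw [hkey, halt]
  set E := (PySem.List.pyRange 0 h 1).foldl
    (fun M i => (PySem.List.pyRange 0 w 1).foldl (fun M j => pvStep2 R G B h w M i j) M)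
    (pvZeros h w ([0, 0, 0] : List Int)) with hE
  have h0 : (0 : Int) ≤ h := by simp [hh]
  have w0 : (0 : Int) ≤ w := by simp [hw]
  apply List.ext_getElem
  · rw [hPf.1]
    simp [PySem.List.length_pyRange_one]
    try omega
  · intro k hk1 hk2
    have hkE : k < E.length := hk1
    have hkh : (k : Int) < h := by
      rw [hPf.1] at hk1; omega
    rw [List.getElem_map, PySem.List.getElem_pyRange_one _ _ _ (by
      simp [PySem.List.length_pyRange_one]; omega)]
    have hrowlen : E[k].length = w.toNat := hPf.2 _ (List.getElem_mem hkE)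
    apply List.ext_getElem
    · rw [hrowlen]
      simp [PySem.List.length_pyRange_one]
      try omega
    · intro l hl1 hl2
      have hlE : l < E[k].length := hl1
      have hlw : (l : Int) < w := by rw [hrowlen] at hl1; omega
      have hw2 : 2 ≤ w := by
        rcases hsz with hz | ⟨_, hz⟩
        · omega
        · omega
      have hh2 : 2 ≤ h := by
        rcases hsz with hz | ⟨hz, _⟩
        · omega
        · omega
      rw [List.getElem_map, PySem.List.getElem_pyRange_one _ _ _ (by
        simp [PySem.List.length_pyRange_one]; omega)]
      have hread : pvRead3 E (k : Int) (l : Int) = E[k][l] := by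
        unfold pvRead3
        rw [PySem.List.pyGetD_of_nonneg _ _ (by omega), PySem.List.pyGetD_of_nonneg _ _ (by omega)]
        simp only [Int.toNat_natCast]
        rw [List.getD_eq_getElem _ _ hkE, List.getD_eq_getElem _ _ hlE]
      rw [← hread, hrf (k : Int) (l : Int) (by omega) (by omega),
        if_pos ⟨by omega, hkh, by omega, hlw⟩]
      simp only [zero_add]
      rw [pv_plane_read mat pattern h w (pvRsrc h w) 'R' _ _ (by omega) hkh (by omega) hlw,
        pv_plane_read mat pattern h w (fun i j => pvGsrc i j) 'G' _ _ (by omega) hkh (by omega) hlw,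
        pv_plane_read mat pattern h w (pvBsrc h w) 'B' _ _ (by omega) hkh (by omega) hlw]
      exact pv_f2_grab mat pattern h w (k : Int) (l : Int) hh2 hw2 (by omega) hkh (by omega) hlw
        (fun a b ha hb => (pv_rgb_reads mat pattern a b ha hb).1)
        (fun a b ha hb => (pv_rgb_reads mat pattern a b ha hb).2.1)
        (fun a b ha hb => (pv_rgb_reads mat pattern a b ha hb).2.2)

-- ===== VERDICT (by name: the statement is the Claim_ definition above) =====
theorem nearest_neighbor_interpolation_spec : Claim_equal_nearest_neighbor_interpolation := by
  intro mat pattern _ hpre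
  unfold Spec_nearest_neighbor_interpolation
  obtain ⟨_, _, _, hsz⟩ := hpre
  apply pv_ports_eq
  rcases hsz with hz | ⟨h1, h2, _⟩
  · exact Or.inl hz
  · exact Or.inr ⟨h1, h2⟩
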